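-- pv_equiv track=rewrite | github.com/bowen01/yhxytctest | Movement.py | check_continuous_element
-- ===== SOURCE A (Python) =====
-- def check_continuous_element(row, value):
--     count = 0
--     for x in row:
--         if x == value:
--             count += 1
--             if count >= 4:
--                 return True
--         else:
--             count = 0
--     return False
-- ===== SOURCE B (Python) =====
-- def check_continuous_element(row, value):
--     target = [value] * 4
--     return any(row[i:i + 4] == target for i in range(len(row) - 3))
-- ===== Notes on version B (the rewrite author's own statement) =====
-- stated objective: alternative
-- what changed: Replaced the stateful run-length counter with a sliding-window existence check: B asks whether any length-4 slice row[i:i+4] equals [value]*4, instead of counting consecutive matches.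
import Mathlib
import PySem

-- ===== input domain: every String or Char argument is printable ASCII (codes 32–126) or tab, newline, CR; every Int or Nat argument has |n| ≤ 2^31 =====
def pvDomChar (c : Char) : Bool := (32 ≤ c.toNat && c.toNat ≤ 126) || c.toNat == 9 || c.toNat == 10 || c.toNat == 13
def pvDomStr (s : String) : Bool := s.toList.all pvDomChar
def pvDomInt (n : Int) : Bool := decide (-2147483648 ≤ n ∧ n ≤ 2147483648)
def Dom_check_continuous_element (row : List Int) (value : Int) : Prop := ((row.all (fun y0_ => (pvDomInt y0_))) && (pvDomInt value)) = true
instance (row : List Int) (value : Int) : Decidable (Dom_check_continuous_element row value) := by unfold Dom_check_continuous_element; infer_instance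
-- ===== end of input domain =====

-- B replaces A's run-length counter with a sliding-window check (any length-4 slice equal to [value]*4); same O(n) cost, different structure.

-- ===== PORT A =====
-- the for-loop with its 'count' accumulator and early return, as structural recursion
def chkGo (value : Int) : List Int → Nat → Bool
  | [], _ => false
  | x :: xs, count =>
      if x = value then
        if count + 1 ≥ 4 then true
        else chkGo value xs (count + 1)
      else chkGo value xs 0

def check_continuous_element (row : List Int) (value : Int) : Bool :=
  chkGo value row 0

-- ===== PORT B =====
def check_continuous_element_alt (row : List Int) (value : Int) : Bool :=
  let target : List Int := [value, value, value, value]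
  (PySem.List.pyRange 0 ((row.length : Int) - 3) 1).any
    (fun i => PySem.List.slice row (some i) (some (i + 4)) == target)

-- ===== PRECONDITION & SPEC =====
def Spec_check_continuous_element (row : List Int) (value : Int) (out : Bool) : Prop := out = check_continuous_element_alt row value
instance (row : List Int) (value : Int) (out : Bool) : Decidable (Spec_check_continuous_element row value out) := by unfold Spec_check_continuous_element; infer_instance

-- ===== CLAIM (what is proved, stated in full; the proofs are below) =====
def Claim_equal_check_continuous_element : Prop := ∀ (row : List Int) (value : Int), Dom_check_continuous_element row value → Spec_check_continuous_element row value (check_continuous_element row value)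

-- ===== LEMMAS AND PROOFS =====

-- invariant characterisation of A's loop state: with counter c, the loop succeeds iff
-- the remaining list starts with 4-c copies of value, or contains a 4-run somewhere
def runSpec (v : Int) (xs : List Int) (c : Nat) : Prop :=
  (4 - c ≤ xs.length ∧ xs.take (4 - c) = List.replicate (4 - c) v) ∨
  (∃ i : Nat, i + 4 ≤ xs.length ∧ (xs.drop i).take 4 = List.replicate 4 v)

lemma runSpec_cons_eq (v : Int) (xs : List Int) (c : Nat) (hc : c ≤ 2) :
    runSpec v (v :: xs) c ↔ runSpec v xs (c + 1) := by
  have h4 : 4 - c = (3 - c) + 1 := by omega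
  constructor
  · rintro (⟨hlen, htake⟩ | ⟨i, hi, hdt⟩)
    · left
      rw [h4] at hlen htake
      simp only [List.take_succ_cons, List.replicate_succ, List.cons.injEq] at htake
      have hlen' : 3 - c ≤ xs.length := by simp at hlen; omega
      have h3c : 4 - (c + 1) = 3 - c := by omega
      rw [h3c]
      exact ⟨hlen', htake.2⟩
    · cases i with
      | zero =>
        left
        simp only [List.drop_zero] at hdt
        have hlen3 : 3 ≤ xs.length := by simp at hi; omega
        have htake3 : xs.take 3 = List.replicate 3 v := by
          have := hdt
          simp only [List.take_succ_cons, List.replicate_succ, List.cons.injEq] at this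
          exact this.2
        have h3c : 4 - (c + 1) = 3 - c := by omega
        refine ⟨by omega, ?_⟩
        rw [h3c]
        have : xs.take (3 - c) = (xs.take 3).take (3 - c) := by
          rw [List.take_take]; congr 1; omega
        rw [this, htake3, List.take_replicate]
        congr 1; omega
      | succ j =>
        right
        exact ⟨j, by simp at hi; omega, by simpa using hdt⟩
  · rintro (⟨hlen, htake⟩ | ⟨j, hj, hdt⟩)
    · left
      have h3c : 4 - (c + 1) = 3 - c := by omega
      rw [h3c] at hlen htake
      rw [h4]
      exact ⟨by simp; omega, by simp [List.replicate_succ, htake]⟩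
    · right
      exact ⟨j + 1, by simp; omega, by simpa using hdt⟩

lemma runSpec_cons_ne (v x : Int) (xs : List Int) (c : Nat) (hx : x ≠ v) (hc : c ≤ 3) :
    runSpec v (x :: xs) c ↔ runSpec v xs 0 := by
  have hwin : runSpec v xs 0 ↔ ∃ i : Nat, i + 4 ≤ xs.length ∧ (xs.drop i).take 4 = List.replicate 4 v := by
    constructor
    · rintro (⟨hlen, htake⟩ | h)
      · exact ⟨0, by simpa using hlen, by simpa using htake⟩
      · exact h
    · intro h; right; exact h
  rw [hwin]
  constructor
  · rintro (⟨hlen, htake⟩ | ⟨i, hi, hdt⟩)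
    · exfalso
      have h4 : 4 - c = (3 - c) + 1 := by omega
      rw [h4] at htake
      simp only [List.take_succ_cons, List.replicate_succ, List.cons.injEq] at htake
      exact hx htake.1
    · cases i with
      | zero =>
        exfalso
        simp only [List.drop_zero, List.take_succ_cons, List.replicate_succ, List.cons.injEq] at hdt
        exact hx hdt.1
      | succ j =>
        exact ⟨j, by simp at hi; omega, by simpa using hdt⟩
  · rintro ⟨j, hj, hdt⟩
    right
    exact ⟨j + 1, by simp; omega, by simpa using hdt⟩

lemma chkGo_iff (v : Int) (xs : List Int) : ∀ c : Nat, c ≤ 3 →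
    (chkGo v xs c = true ↔ runSpec v xs c) := by
  induction xs with
  | nil =>
    intro c hc
    simp only [chkGo, runSpec, List.length_nil]
    constructor
    · intro h; exact absurd h (by simp)
    · rintro (⟨h, _⟩ | ⟨i, hi, _⟩) <;> omega
  | cons x xs ih =>
    intro c hc
    by_cases hx : x = v
    · subst hx
      by_cases hc3 : c = 3
      · subst hc3
        simp only [chkGo, if_true, if_pos (by omega : 3 + 1 ≥ 4)]
        constructor
        · intro _
          left
          refine ⟨by simp, ?_⟩
          simp [(by omega : 4 - 3 = 1), List.replicate]
        · intro _; trivial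
      · have hc2 : c ≤ 2 := by omega
        have : chkGo x (x :: xs) c = chkGo x xs (c + 1) := by
          simp only [chkGo, if_true, if_neg (by omega : ¬ c + 1 ≥ 4)]
        rw [this, ih (c + 1) (by omega), runSpec_cons_eq x xs c hc2]
    · have : chkGo v (x :: xs) c = chkGo v xs 0 := by
        simp only [chkGo, if_neg hx]
      rw [this, ih 0 (by omega), runSpec_cons_ne v x xs c hx hc]

lemma alt_iff (row : List Int) (v : Int) :
    check_continuous_element_alt row v = true ↔
      ∃ i : Nat, i + 4 ≤ row.length ∧ (row.drop i).take 4 = List.replicate 4 v := by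
  unfold check_continuous_element_alt
  simp only [List.any_eq_true, beq_iff_eq]
  constructor
  · rintro ⟨i, hmem, hsl⟩
    rw [PySem.List.mem_pyRange_one] at hmem
    obtain ⟨h0, hlt⟩ := hmem
    refine ⟨i.toNat, by omega, ?_⟩
    rw [PySem.List.slice_toNat row h0 (by omega)] at hsl
    have : (i + 4).toNat - i.toNat = 4 := by omega
    rw [this] at hsl
    simpa [List.replicate] using hsl
  · rintro ⟨k, hk, hdt⟩
    refine ⟨(k : Int), ?_, ?_⟩
    · rw [PySem.List.mem_pyRange_one]; constructor <;> omega
    · rw [PySem.List.slice_toNat row (by omega) (by omega)]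
      have : ((k : Int) + 4).toNat - ((k : Int)).toNat = 4 := by omega
      rw [this]
      simpa [List.replicate] using hdt

-- ===== VERDICT (by name: the statement is the Claim_ definition above) =====
theorem check_continuous_element_spec : Claim_equal_check_continuous_element := by
  intro row v _
  unfold Spec_check_continuous_element
  rw [Bool.eq_iff_iff]
  unfold check_continuous_element
  rw [chkGo_iff v row 0 (by omega), alt_iff]
  unfold runSpec
  constructor
  · rintro (⟨hlen, htake⟩ | h)
    · exact ⟨0, by simpa using hlen, by simpa using htake⟩
    · exact h
  · intro h; right; exact h
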